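-- pv_equiv track=rewrite | github.com/wwiras/ac | AC2.py | agglomerative_clustering
-- ===== SOURCE A (Python) =====
-- def calculate_distance(cluster_a, cluster_b, distance_matrix):
--     """
--     Calculates the distance between two clusters using complete linkage (farthest neighbor).
--     The distance between two clusters is defined as the maximum distance between
--     any node in the first cluster and any node in the second cluster.
--     """
--     max_distance = 0.0
--     for node_i in cluster_a:
--         for node_j in cluster_b:
--             distance = distance_matrix[node_i][node_j]
--             if distance > max_distance:
--                 max_distance = distance
--
--     return max_distance
--
-- def agglomerative_clustering(num_nodes, num_clusters, distance_matrix):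
--     """
--     Performs agglomerative clustering based on the provided algorithm description.
--     """
--     # 9: Initialize C where each ci contains one node si.
--     clusters = [[i] for i in range(num_nodes)]
--
--     while len(clusters) > num_clusters:
--         min_distance = float('inf')
--         clusters_to_merge = None
--
--         # 12: Find the pair of clusters with minimum D(ci, cj)
--         for i in range(len(clusters)):
--             for j in range(i + 1, len(clusters)):
--                 distance = calculate_distance(clusters[i], clusters[j], distance_matrix)
--
--                 if distance < min_distance:
--                     min_distance = distance
--                     clusters_to_merge = (i, j)
--
--         if clusters_to_merge is not None:
--             index_a, index_b = clusters_to_merge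
--
--             # Ensure the indices are sorted to avoid issues when removing
--             if index_a > index_b:
--                 index_a, index_b = index_b, index_a
--
--             # 13: Merge the two clusters
--             new_cluster = clusters[index_a] + clusters[index_b]
--
--             # 14: Update C: Remove old clusters and add the new one
--             clusters.pop(index_b)
--             clusters.pop(index_a)
--             clusters.append(new_cluster)
--         else:
--             # Should not happen in a connected graph with more than 1 cluster
--             break
--
--     # 17: Return C
--     return clusters
-- ===== SOURCE B (Python) =====
-- def agglomerative_clustering(num_nodes, num_clusters, distance_matrix):
--     """
--     Complete-linkage agglomerative clustering, but with an incrementally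
--     maintained cluster-distance matrix: the linkage distance of a merged
--     cluster to any other cluster is the max of the two old distances, so
--     no pairwise node scan is ever repeated.
--     """
--     clusters = [[i] for i in range(num_nodes)]
--     if len(clusters) <= num_clusters:
--         return clusters
--     # D[i][j] = complete-linkage distance between clusters i and j
--     # (clamped at 0, exactly as the farthest-neighbour scan starting at 0.0 yields)
--     D = [[max(0, distance_matrix[i][j]) for j in range(num_nodes)]
--          for i in range(num_nodes)]
--     while len(clusters) > num_clusters:
--         best = None  # (distance, a, b) with a < b; first minimum wins
--         for i in range(len(clusters)):
--             row = D[i]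
--             for j in range(i + 1, len(clusters)):
--                 if best is None or row[j] < best[0]:
--                     best = (row[j], i, j)
--         if best is None:
--             break
--         _, a, b = best
--         merged = clusters[a] + clusters[b]
--         merged_row = [max(x, y) for x, y in zip(D[a], D[b])]
--         del clusters[b]
--         del clusters[a]
--         del D[b]
--         del D[a]
--         for row in D:
--             e = max(row[a], row[b])
--             del row[b]
--             del row[a]
--             row.append(e)
--         del merged_row[b]
--         del merged_row[a]
--         merged_row.append(0)
--         D.append(merged_row)
--         clusters.append(merged)
--     return clusters
-- ===== Notes on version B (the rewrite author's own statement) =====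
-- stated objective: alternative
-- what changed: B maintains a cluster-distance matrix and updates merged rows as an elementwise max, so each round's pair scan reads one cell instead of re-running A's farthest-neighbour double loop over all node pairs of every cluster pair; it trades O(n^2) extra memory for never recomputing a linkage distance.
-- outside the precondition, e.g. on agglomerative_clustering(3, 2, [[0, 5, 1], [0, 0, 2]]): A returns [[1], [0, 2]], B raises IndexError; on agglomerative_clustering(1, 0, []): A returns [[0]], B raises IndexError
import Mathlib
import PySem

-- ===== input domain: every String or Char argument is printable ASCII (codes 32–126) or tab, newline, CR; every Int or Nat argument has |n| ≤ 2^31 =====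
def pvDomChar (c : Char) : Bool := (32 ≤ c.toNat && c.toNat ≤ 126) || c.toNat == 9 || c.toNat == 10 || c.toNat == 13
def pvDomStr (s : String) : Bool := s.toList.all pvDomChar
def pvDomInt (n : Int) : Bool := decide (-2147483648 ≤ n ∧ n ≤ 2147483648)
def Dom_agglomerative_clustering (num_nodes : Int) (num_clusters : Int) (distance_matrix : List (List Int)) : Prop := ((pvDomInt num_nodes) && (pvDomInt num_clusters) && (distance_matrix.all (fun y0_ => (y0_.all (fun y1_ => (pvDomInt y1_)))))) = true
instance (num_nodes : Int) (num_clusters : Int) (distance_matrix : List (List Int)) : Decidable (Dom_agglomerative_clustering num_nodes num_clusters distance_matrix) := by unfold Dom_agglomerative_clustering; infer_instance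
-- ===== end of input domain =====

-- B replaces A's per-round recomputation of every complete-linkage distance by an
-- incrementally maintained cluster-distance matrix (merged rows are the elementwise
-- max of the two old rows); objective: alternative algorithm, no repeated node scans.

-- ===== PORT A =====

-- calculate_distance: farthest-neighbour scan starting from 0.0
def pvCalcDist (cluster_a cluster_b : List Int) (distance_matrix : List (List Int)) : Int :=
  cluster_a.foldl (fun max_distance node_i =>
    cluster_b.foldl (fun max_distance node_j =>
      let distance := PySem.List.pyGetD (PySem.List.pyGetD distance_matrix node_i []) node_j 0
      if max_distance < distance then distance else max_distance) max_distance) 0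

-- the nested pair scan: best = (min_distance, (i, j)); None plays float('inf')'s role
def pvScanA (clusters : List (List Int)) (M : List (List Int)) : Option (Int × Int × Int) :=
  (PySem.List.pyRange 0 (PySem.List.len clusters) 1).foldl (fun best i =>
    (PySem.List.pyRange (i + 1) (PySem.List.len clusters) 1).foldl (fun best j =>
      let distance := pvCalcDist (PySem.List.pyGetD clusters i []) (PySem.List.pyGetD clusters j []) M
      match best with
      | none => some (distance, i, j)
      | some (m, p) => if distance < m then some (distance, i, j) else some (m, p)) best) none

-- merge step: new_cluster = clusters[a] + clusters[b]; pop(b); pop(a); append.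
-- The pops happen at in-range indices (the scan yields 0 ≤ a < b < len), where pop = eraseIdx.
def pvMergeClusters (clusters : List (List Int)) (index_a index_b : Int) : List (List Int) :=
  let s := if index_a > index_b then (index_b, index_a) else (index_a, index_b)
  let new_cluster := PySem.List.pyGetD clusters s.1 [] ++ PySem.List.pyGetD clusters s.2 []
  ((clusters.eraseIdx s.2.toNat).eraseIdx s.1.toNat) ++ [new_cluster]

-- the while loop; fuel = clusters.length suffices (each round merges, shrinking by 1, or breaks)
def pvLoopA (num_clusters : Int) (M : List (List Int)) : Nat → List (List Int) → List (List Int)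
  | 0, clusters => clusters
  | fuel + 1, clusters =>
    if PySem.List.len clusters > num_clusters then
      match pvScanA clusters M with
      | some (_, i, j) => pvLoopA num_clusters M fuel (pvMergeClusters clusters i j)
      | none => clusters
    else clusters

def agglomerative_clustering (num_nodes : Int) (num_clusters : Int) (distance_matrix : List (List Int)) : List (List Int) :=
  let clusters := (PySem.List.pyRange 0 num_nodes 1).map (fun i => [i])
  pvLoopA num_clusters distance_matrix clusters.length clusters

-- ===== PORT B =====

-- the pair scan over the maintained distance matrix D (no node scans)
def pvScanB (clusters D : List (List Int)) : Option (Int × Int × Int) :=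
  (PySem.List.pyRange 0 (PySem.List.len clusters) 1).foldl (fun best i =>
    let row := PySem.List.pyGetD D i []
    (PySem.List.pyRange (i + 1) (PySem.List.len clusters) 1).foldl (fun best j =>
      match best with
      | none => some (PySem.List.pyGetD row j 0, i, j)
      | some (m, p) =>
          if PySem.List.pyGetD row j 0 < m then some (PySem.List.pyGetD row j 0, i, j)
          else some (m, p)) best) none

-- per-row update: e = max(row[a], row[b]); del row[b]; del row[a]; row.append(e)
-- (the dels happen at in-range indices 0 ≤ a < b < len row, where del = eraseIdx)
def pvTrimRow (a b : Int) (row : List Int) : List Int :=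
  let e := max (PySem.List.pyGetD row a 0) (PySem.List.pyGetD row b 0)
  ((row.eraseIdx b.toNat).eraseIdx a.toNat) ++ [e]

-- merge step of B: update clusters and the distance matrix
def pvMergeB (clusters D : List (List Int)) (a b : Int) : List (List Int) × List (List Int) :=
  let merged := PySem.List.pyGetD clusters a [] ++ PySem.List.pyGetD clusters b []
  let merged_row := List.zipWith max (PySem.List.pyGetD D a []) (PySem.List.pyGetD D b [])
  let clusters' := ((clusters.eraseIdx b.toNat).eraseIdx a.toNat) ++ [merged]
  let D' := (((D.eraseIdx b.toNat).eraseIdx a.toNat).map (pvTrimRow a b))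
            ++ [((merged_row.eraseIdx b.toNat).eraseIdx a.toNat) ++ [0]]
  (clusters', D')

def pvLoopB (num_clusters : Int) : Nat → List (List Int) → List (List Int) → List (List Int)
  | 0, clusters, _ => clusters
  | fuel + 1, clusters, D =>
    if PySem.List.len clusters > num_clusters then
      match pvScanB clusters D with
      | some (_, a, b) =>
          let st := pvMergeB clusters D a b
          pvLoopB num_clusters fuel st.1 st.2
      | none => clusters
    else clusters

def agglomerative_clustering_alt (num_nodes : Int) (num_clusters : Int) (distance_matrix : List (List Int)) : List (List Int) :=
  let clusters := (PySem.List.pyRange 0 num_nodes 1).map (fun i => [i])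
  if PySem.List.len clusters ≤ num_clusters then clusters
  else
    let D := (PySem.List.pyRange 0 num_nodes 1).map (fun i =>
      (PySem.List.pyRange 0 num_nodes 1).map (fun j =>
        max 0 (PySem.List.pyGetD (PySem.List.pyGetD distance_matrix i []) j 0)))
    pvLoopB num_clusters clusters.length clusters D

-- ===== PRECONDITION & SPEC =====
-- Whenever any merging runs (num_clusters < num_nodes with at least one node), Pre_ demands a
-- full num_nodes×num_nodes matrix: outside it Python raises IndexError — except on some ragged
-- matrices where A happens to read only the upper-triangle entries it needs and still returns
-- while B (which builds the full matrix once) raises; those inputs are excluded, see cites.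
def Pre_agglomerative_clustering (num_nodes : Int) (num_clusters : Int) (distance_matrix : List (List Int)) : Prop :=
  num_nodes ≤ num_clusters ∨ num_nodes ≤ 0 ∨
  (num_nodes ≤ PySem.List.len distance_matrix ∧
   ∀ row ∈ distance_matrix.take num_nodes.toNat, num_nodes ≤ PySem.List.len row)
instance (num_nodes : Int) (num_clusters : Int) (distance_matrix : List (List Int)) : Decidable (Pre_agglomerative_clustering num_nodes num_clusters distance_matrix) := by unfold Pre_agglomerative_clustering; infer_instance

def pvWitness_agglomerative_clustering : Int × Int × List (List Int) := (2, 1, [[0, 3], [3, 0]])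

def Spec_agglomerative_clustering (num_nodes : Int) (num_clusters : Int) (distance_matrix : List (List Int)) (out : List (List Int)) : Prop := out = agglomerative_clustering_alt num_nodes num_clusters distance_matrix
instance (num_nodes : Int) (num_clusters : Int) (distance_matrix : List (List Int)) (out : List (List Int)) : Decidable (Spec_agglomerative_clustering num_nodes num_clusters distance_matrix out) := by unfold Spec_agglomerative_clustering; infer_instance

-- ===== CLAIM (what is proved, stated in full; the proofs are below) =====
def Claim_equal_agglomerative_clustering : Prop := ∀ (num_nodes : Int) (num_clusters : Int) (distance_matrix : List (List Int)), Dom_agglomerative_clustering num_nodes num_clusters distance_matrix → Pre_agglomerative_clustering num_nodes num_clusters distance_matrix → Spec_agglomerative_clustering num_nodes num_clusters distance_matrix (agglomerative_clustering num_nodes num_clusters distance_matrix)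

-- ===== LEMMAS AND PROOFS =====

-- the single matrix entry both programs read
def pvG (M : List (List Int)) (i j : Int) : Int :=
  PySem.List.pyGetD (PySem.List.pyGetD M i []) j 0

def pvSup (l : List Int) : Int := l.foldl max 0

def pvPairs (a b : List Int) (M : List (List Int)) : List Int :=
  a.flatMap (fun i => b.map (pvG M i))

theorem pv_foldl_max_shift (l : List Int) (p q : Int) :
    l.foldl max (max p q) = max p (l.foldl max q) := by
  induction l generalizing q with
  | nil => rfl
  | cons x xs ih => simpa [List.foldl_cons, max_assoc] using ih (max q x)

theorem pvSup_nonneg (l : List Int) : 0 ≤ pvSup l := by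
  have h := pv_foldl_max_shift l 0 0
  simp only [max_self] at h
  unfold pvSup
  omega

theorem pvSup_append (l1 l2 : List Int) : pvSup (l1 ++ l2) = max (pvSup l1) (pvSup l2) := by
  have h0 : max (pvSup l1) 0 = pvSup l1 := max_eq_left (pvSup_nonneg l1)
  calc pvSup (l1 ++ l2) = l2.foldl max (pvSup l1) := by simp [pvSup, List.foldl_append]
    _ = l2.foldl max (max (pvSup l1) 0) := by rw [h0]
    _ = max (pvSup l1) (pvSup l2) := pv_foldl_max_shift l2 _ 0

theorem pvCalcDist_eq_sup (a b : List Int) (M : List (List Int)) :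
    pvCalcDist a b M = pvSup (pvPairs a b M) := by
  unfold pvCalcDist pvPairs pvSup
  rw [List.foldl_flatMap]
  refine PySem.List.foldl_congr_mem' a _ _ 0 ?_
  intro i _ acc
  rw [List.foldl_map]
  refine PySem.List.foldl_congr_mem' b _ _ acc ?_
  intro j _ m
  show (if m < pvG M i j then pvG M i j else m) = max m (pvG M i j)
  omega

theorem pvCalcDist_append_left (x y c : List Int) (M : List (List Int)) :
    pvCalcDist (x ++ y) c M = max (pvCalcDist x c M) (pvCalcDist y c M) := by
  rw [pvCalcDist_eq_sup, pvCalcDist_eq_sup, pvCalcDist_eq_sup, pvPairs,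
    List.flatMap_append, pvSup_append]; rfl

theorem pvSup_flatMap_aux (f : Int → List Int) (l : List Int) (m : Int) (hm : 0 ≤ m) :
    l.foldl (fun acc i => max acc (pvSup (f i))) m = max m (pvSup (l.flatMap f)) := by
  induction l generalizing m with
  | nil => simp [pvSup, max_eq_left hm]
  | cons x xs ih =>
      rw [List.foldl_cons, ih _ (le_trans hm (le_max_left _ _)), List.flatMap_cons,
        pvSup_append, max_assoc]

theorem pvSup_flatMap (f : Int → List Int) (l : List Int) :
    pvSup (l.flatMap f) = l.foldl (fun acc i => max acc (pvSup (f i))) 0 := by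
  rw [pvSup_flatMap_aux f l 0 le_rfl, max_eq_right (pvSup_nonneg _)]

theorem pv_foldl_max_split (h1 h2 : Int → Int) (l : List Int) (p q : Int) :
    l.foldl (fun m i => max m (max (h1 i) (h2 i))) (max p q)
      = max (l.foldl (fun m i => max m (h1 i)) p) (l.foldl (fun m i => max m (h2 i)) q) := by
  induction l generalizing p q with
  | nil => rfl
  | cons x xs ih =>
      have : max (max p q) (max (h1 x) (h2 x)) = max (max p (h1 x)) (max q (h2 x)) := by
        omega
      rw [List.foldl_cons, this, ih]; rfl

theorem pvCalcDist_append_right (c x y : List Int) (M : List (List Int)) :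
    pvCalcDist c (x ++ y) M = max (pvCalcDist c x M) (pvCalcDist c y M) := by
  rw [pvCalcDist_eq_sup, pvCalcDist_eq_sup, pvCalcDist_eq_sup, pvPairs, pvSup_flatMap]
  have hcong : ∀ i : Int,
      pvSup ((x ++ y).map (pvG M i)) = max (pvSup (x.map (pvG M i))) (pvSup (y.map (pvG M i))) := by
    intro i; rw [List.map_append, pvSup_append]
  calc c.foldl (fun acc i => max acc (pvSup ((x ++ y).map (pvG M i)))) 0
      = c.foldl (fun acc i => max acc (max (pvSup (x.map (pvG M i))) (pvSup (y.map (pvG M i))))) 0 := by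
        exact PySem.List.foldl_congr_mem' c _ _ 0 (by intro i _ acc; rw [hcong i])
    _ = max (c.foldl (fun m i => max m (pvSup (x.map (pvG M i)))) 0)
            (c.foldl (fun m i => max m (pvSup (y.map (pvG M i)))) 0) := by
        simpa using pv_foldl_max_split (fun i => pvSup (x.map (pvG M i)))
          (fun i => pvSup (y.map (pvG M i))) c 0 0
    _ = max (pvSup (pvPairs c x M)) (pvSup (pvPairs c y M)) := by
        rw [pvPairs, pvPairs, pvSup_flatMap, pvSup_flatMap]


def pvEmb (a b k : Nat) : Nat := if k < a then k else if k + 1 < b then k + 1 else k + 2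

theorem pv_pyGetD_toNat {α : Type} (xs : List α) (i : Int) (d : α) (h0 : 0 ≤ i)
    (h1 : i.toNat < xs.length) : PySem.List.pyGetD xs i d = xs.getD i.toNat d := by
  rw [PySem.List.pyGetD_eq_getElem xs d h0 (by omega), List.getD_eq_getElem _ _ h1]

theorem pv_getD_append_left {α : Type} (xs ys : List α) (i : Nat) (d : α) (h : i < xs.length) :
    (xs ++ ys).getD i d = xs.getD i d := by
  rw [List.getD_eq_getElem _ _ (by simp; omega), List.getD_eq_getElem _ _ h]
  exact List.getElem_append_left h

theorem pv_getD_append_sing {α : Type} (xs : List α) (y : α) (d : α) :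
    (xs ++ [y]).getD xs.length d = y := by
  rw [List.getD_eq_getElem _ _ (by simp), List.getElem_append_right (le_refl _)]
  simp

theorem pv_getD_map {α β : Type} (f : α → β) (l : List α) (i : Nat) (h : i < l.length)
    (d : β) (d' : α) : (l.map f).getD i d = f (l.getD i d') := by
  rw [List.getD_eq_getElem _ _ (by simpa), List.getD_eq_getElem _ _ h, List.getElem_map]

theorem pv_getD_zipWith (l1 l2 : List Int) (i : Nat) (h1 : i < l1.length) (h2 : i < l2.length) :
    (List.zipWith max l1 l2).getD i 0 = max (l1.getD i 0) (l2.getD i 0) := by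
  rw [List.getD_eq_getElem _ _ (by rw [List.length_zipWith]; omega),
    List.getD_eq_getElem _ _ h1, List.getD_eq_getElem _ _ h2, List.getElem_zipWith]

theorem pvEmb_facts (a b k n : Nat) (hab : a < b) (hb : b < n) (hk : k < n - 2) :
    pvEmb a b k < n ∧ pvEmb a b k ≠ a ∧ pvEmb a b k ≠ b := by
  unfold pvEmb; split_ifs <;> omega

theorem pvEmb_inj (a b i j : Nat) (hij : i ≠ j) : pvEmb a b i ≠ pvEmb a b j := by
  unfold pvEmb; split_ifs <;> omega

-- the loop invariant of B: D is the complete-linkage distance table of clusters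
def pvInv (cs D M : List (List Int)) : Prop :=
  D.length = cs.length ∧ (∀ r ∈ D, r.length = cs.length) ∧
  ∀ i j : Nat, i < cs.length → j < cs.length → i ≠ j →
    (D.getD i []).getD j 0 = pvCalcDist (cs.getD i []) (cs.getD j []) M

theorem pv_getD_erase2 {α : Type} (l : List α) (a b k : Nat) (d : α) (hab : a < b)
    (hb : b < l.length) (hk : k < l.length - 2) :
    ((l.eraseIdx b).eraseIdx a).getD k d = l.getD (pvEmb a b k) d := by
  have hl1 : (l.eraseIdx b).length = l.length - 1 := by rw [List.length_eraseIdx]; simp [hb]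
  have hl2 : ((l.eraseIdx b).eraseIdx a).length = l.length - 2 := by
    rw [List.length_eraseIdx, hl1]; split <;> omega
  have hke : pvEmb a b k < l.length := by unfold pvEmb; split_ifs <;> omega
  rw [List.getD_eq_getElem _ _ (by omega), List.getD_eq_getElem _ _ hke]
  by_cases h1 : k < a
  · have e1 : pvEmb a b k = k := by unfold pvEmb; rw [if_pos h1]
    rw [List.getElem_eraseIdx, dif_pos h1, List.getElem_eraseIdx, dif_pos (show k < b by omega)]
    exact getElem_congr_idx e1.symm
  · by_cases h2 : k + 1 < b
    · have e1 : pvEmb a b k = k + 1 := by unfold pvEmb; rw [if_neg h1, if_pos h2]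
      rw [List.getElem_eraseIdx, dif_neg h1, List.getElem_eraseIdx, dif_pos h2]
      exact getElem_congr_idx e1.symm
    · have e1 : pvEmb a b k = k + 2 := by unfold pvEmb; rw [if_neg h1, if_neg h2]
      rw [List.getElem_eraseIdx, dif_neg h1, List.getElem_eraseIdx, dif_neg h2]
      exact getElem_congr_idx e1.symm

theorem pvInv_merge (cs D M : List (List Int)) (h : pvInv cs D M) (a b : Int)
    (ha : 0 ≤ a) (hab : a < b) (hb : b < (cs.length : Int)) :
    pvInv (pvMergeB cs D a b).1 (pvMergeB cs D a b).2 M := by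
  obtain ⟨hlen, hrows, hval⟩ := h
  have hanbn : a.toNat < b.toNat := by omega
  have hbn : b.toNat < cs.length := by omega
  have hn2 : 2 ≤ cs.length := by omega
  have hmem : ∀ k, k < cs.length → D.getD k [] ∈ D := by
    intro k hk
    rw [List.getD_eq_getElem _ _ (by omega)]
    exact List.getElem_mem _
  have hra : (D.getD a.toNat []).length = cs.length := hrows _ (hmem a.toNat (by omega))
  have hrb : (D.getD b.toNat []).length = cs.length := hrows _ (hmem b.toNat (by omega))
  have hlen2 : ∀ {α : Type} (r : List α), r.length = cs.length →
      ((r.eraseIdx b.toNat).eraseIdx a.toNat).length = cs.length - 2 := by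
    intro α r hrl
    simp only [List.length_eraseIdx, hrl]
    split_ifs <;> omega
  have hfst : (pvMergeB cs D a b).1
      = ((cs.eraseIdx b.toNat).eraseIdx a.toNat) ++ [cs.getD a.toNat [] ++ cs.getD b.toNat []] := by
    simp only [pvMergeB]
    rw [pv_pyGetD_toNat cs a [] ha (by omega), pv_pyGetD_toNat cs b [] (by omega) (by omega)]
  have hsnd : (pvMergeB cs D a b).2
      = (((D.eraseIdx b.toNat).eraseIdx a.toNat).map (pvTrimRow a b))
        ++ [(((List.zipWith max (D.getD a.toNat []) (D.getD b.toNat [])).eraseIdx b.toNat).eraseIdx a.toNat) ++ [0]] := by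
    simp only [pvMergeB]
    rw [pv_pyGetD_toNat D a [] ha (by omega), pv_pyGetD_toNat D b [] (by omega) (by omega)]
  rw [hfst, hsnd]
  have he2cs := hlen2 cs rfl
  have he2D := hlen2 D hlen
  have hmr_len : (List.zipWith max (D.getD a.toNat []) (D.getD b.toNat [])).length = cs.length := by
    rw [List.length_zipWith, hra, hrb]; omega
  have he2mr := hlen2 _ hmr_len
  have hcs' : (((cs.eraseIdx b.toNat).eraseIdx a.toNat) ++ [cs.getD a.toNat [] ++ cs.getD b.toNat []]).length
      = cs.length - 1 := by
    rw [List.length_append, he2cs]; simp; omega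
  have htrim_len : ∀ r : List Int, r.length = cs.length →
      (pvTrimRow a b r).length = cs.length - 1 := by
    intro r hrl
    simp only [pvTrimRow]
    rw [List.length_append, hlen2 r hrl]; simp; omega
  refine ⟨?_, ?_, ?_⟩
  · rw [hcs', List.length_append, List.length_map, he2D]; simp; omega
  · intro r hr
    rw [hcs']
    rcases List.mem_append.1 hr with hr | hr
    · obtain ⟨r0, hr0, rfl⟩ := List.mem_map.1 hr
      exact htrim_len r0 (hrows _ (List.mem_of_mem_eraseIdx (List.mem_of_mem_eraseIdx hr0)))
    · simp only [List.mem_singleton] at hr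
      subst hr
      rw [List.length_append, he2mr]; simp; omega
  · intro i j hi hj hij
    rw [hcs'] at hi hj
    have hGet : ∀ k, k < cs.length - 2 →
        (((cs.eraseIdx b.toNat).eraseIdx a.toNat) ++ [cs.getD a.toNat [] ++ cs.getD b.toNat []]).getD k []
          = cs.getD (pvEmb a.toNat b.toNat k) [] := by
      intro k hk
      rw [pv_getD_append_left _ _ _ _ (by omega), pv_getD_erase2 cs a.toNat b.toNat k [] hanbn hbn hk]
    have hLast : (((cs.eraseIdx b.toNat).eraseIdx a.toNat) ++ [cs.getD a.toNat [] ++ cs.getD b.toNat []]).getD (cs.length - 2) []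
        = cs.getD a.toNat [] ++ cs.getD b.toNat [] := by
      have h0 := pv_getD_append_sing ((cs.eraseIdx b.toNat).eraseIdx a.toNat)
        (cs.getD a.toNat [] ++ cs.getD b.toNat []) ([] : List Int)
      rwa [he2cs] at h0
    have hDrow : ∀ k, k < cs.length - 2 →
        ((((D.eraseIdx b.toNat).eraseIdx a.toNat).map (pvTrimRow a b))
          ++ [(((List.zipWith max (D.getD a.toNat []) (D.getD b.toNat [])).eraseIdx b.toNat).eraseIdx a.toNat) ++ [0]]).getD k []
          = pvTrimRow a b (D.getD (pvEmb a.toNat b.toNat k) []) := by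
      intro k hk
      rw [pv_getD_append_left _ _ _ _ (by rw [List.length_map]; omega),
        pv_getD_map _ _ k (by omega) [] [],
        pv_getD_erase2 D a.toNat b.toNat k [] hanbn (by omega) (by omega)]
    have hDlast : ((((D.eraseIdx b.toNat).eraseIdx a.toNat).map (pvTrimRow a b))
          ++ [(((List.zipWith max (D.getD a.toNat []) (D.getD b.toNat [])).eraseIdx b.toNat).eraseIdx a.toNat) ++ [0]]).getD (cs.length - 2) []
        = (((List.zipWith max (D.getD a.toNat []) (D.getD b.toNat [])).eraseIdx b.toNat).eraseIdx a.toNat) ++ [0] := by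
      have h0 := pv_getD_append_sing (((D.eraseIdx b.toNat).eraseIdx a.toNat).map (pvTrimRow a b))
        ((((List.zipWith max (D.getD a.toNat []) (D.getD b.toNat [])).eraseIdx b.toNat).eraseIdx a.toNat) ++ [0]) ([] : List Int)
      rwa [List.length_map, he2D] at h0
    have htrim_get : ∀ r : List Int, r.length = cs.length → ∀ k, k < cs.length - 2 →
        (pvTrimRow a b r).getD k 0 = r.getD (pvEmb a.toNat b.toNat k) 0 := by
      intro r hrl k hk
      simp only [pvTrimRow]
      rw [pv_getD_append_left _ _ _ _ (by rw [hlen2 r hrl]; omega),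
        pv_getD_erase2 r a.toNat b.toNat k 0 hanbn (by omega) (by rw [hrl]; omega)]
    have htrim_last : ∀ r : List Int, r.length = cs.length →
        (pvTrimRow a b r).getD (cs.length - 2) 0 = max (r.getD a.toNat 0) (r.getD b.toNat 0) := by
      intro r hrl
      simp only [pvTrimRow]
      rw [pv_pyGetD_toNat r a 0 ha (by omega), pv_pyGetD_toNat r b 0 (by omega) (by omega)]
      have h0 := pv_getD_append_sing ((r.eraseIdx b.toNat).eraseIdx a.toNat)
        (max (r.getD a.toNat 0) (r.getD b.toNat 0)) 0
      rwa [hlen2 r hrl] at h0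
    by_cases hi2 : i < cs.length - 2
    · obtain ⟨hei_lt, hei_a, hei_b⟩ := pvEmb_facts a.toNat b.toNat i cs.length hanbn hbn hi2
      by_cases hj2 : j < cs.length - 2
      · obtain ⟨hej_lt, hej_a, hej_b⟩ := pvEmb_facts a.toNat b.toNat j cs.length hanbn hbn hj2
        rw [hDrow i hi2, htrim_get _ (hrows _ (hmem _ hei_lt)) j hj2, hGet i hi2, hGet j hj2]
        exact hval _ _ hei_lt hej_lt (pvEmb_inj a.toNat b.toNat i j hij)
      · have hj3 : j = cs.length - 2 := by omega
        subst hj3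
        rw [hDrow i hi2, htrim_last _ (hrows _ (hmem _ hei_lt)), hGet i hi2, hLast,
          hval _ _ hei_lt (by omega) hei_a, hval _ _ hei_lt (by omega) hei_b,
          pvCalcDist_append_right]
    · have hi3 : i = cs.length - 2 := by omega
      subst hi3
      by_cases hj2 : j < cs.length - 2
      · obtain ⟨hej_lt, hej_a, hej_b⟩ := pvEmb_facts a.toNat b.toNat j cs.length hanbn hbn hj2
        rw [hDlast, hLast, hGet j hj2,
          pv_getD_append_left _ _ _ _ (by rw [he2mr]; omega),
          pv_getD_erase2 _ a.toNat b.toNat j 0 hanbn (by omega) (by rw [hmr_len]; omega),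
          pv_getD_zipWith _ _ _ (by omega) (by omega),
          hval _ _ (by omega) hej_lt (Ne.symm hej_a), hval _ _ (by omega) hej_lt (Ne.symm hej_b),
          pvCalcDist_append_left]
      · omega

theorem pvScan_eq (cs D M : List (List Int)) (h : pvInv cs D M) :
    pvScanA cs M = pvScanB cs D := by
  obtain ⟨hlen, hrows, hval⟩ := h
  unfold pvScanA pvScanB
  refine PySem.List.foldl_congr_mem' _ _ _ none ?_
  intro i hi best
  simp only []
  refine PySem.List.foldl_congr_mem' _ _ _ best ?_
  intro j hj acc
  obtain ⟨hi0, hi1⟩ := PySem.List.mem_pyRange_one.1 hi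
  obtain ⟨hj0, hj1⟩ := PySem.List.mem_pyRange_one.1 hj
  simp only [PySem.List.len_eq] at hi1 hj1
  have hin : i.toNat < cs.length := by omega
  have hjn : j.toNat < cs.length := by omega
  have hrow_len : (D.getD i.toNat []).length = cs.length := by
    refine hrows _ ?_
    rw [List.getD_eq_getElem _ _ (by omega)]
    exact List.getElem_mem _
  have key : pvCalcDist (PySem.List.pyGetD cs i []) (PySem.List.pyGetD cs j []) M
      = PySem.List.pyGetD (PySem.List.pyGetD D i []) j 0 := by
    rw [pv_pyGetD_toNat cs i [] hi0 hin, pv_pyGetD_toNat cs j [] (by omega) hjn,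
      pv_pyGetD_toNat D i [] hi0 (by omega),
      pv_pyGetD_toNat _ j 0 (by omega) (by rw [hrow_len]; omega)]
    exact (hval i.toNat j.toNat hin hjn (by omega)).symm
  rw [key]

theorem pvScanA_bounds (cs M : List (List Int)) (d i j : Int)
    (h : pvScanA cs M = some (d, i, j)) : 0 ≤ i ∧ i < j ∧ j < (cs.length : Int) := by
  unfold pvScanA at h
  refine List.foldlRecOn
    (motive := fun o => ∀ d' i' j', o = some (d', i', j') → 0 ≤ i' ∧ i' < j' ∧ j' < (cs.length : Int))
    _ _ (by intro _ _ _ hh; cases hh) ?_ d i j h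
  intro best hbest i' hi'
  obtain ⟨hi0, hi1⟩ := PySem.List.mem_pyRange_one.1 hi'
  simp only [PySem.List.len_eq] at hi1
  simp only []
  refine List.foldlRecOn
    (motive := fun o => ∀ d' i' j', o = some (d', i', j') → 0 ≤ i' ∧ i' < j' ∧ j' < (cs.length : Int))
    _ _ hbest ?_
  intro b' hb' j' hj' d2 i2 j2 heq
  obtain ⟨hj0, hj1⟩ := PySem.List.mem_pyRange_one.1 hj'
  simp only [PySem.List.len_eq] at hj1
  cases b' with
  | none =>
      simp only [Option.some.injEq, Prod.mk.injEq] at heq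
      refine ⟨by omega, by omega, by omega⟩
  | some t =>
      obtain ⟨m, p⟩ := t
      dsimp only at heq
      by_cases hlt : pvCalcDist (PySem.List.pyGetD cs i' []) (PySem.List.pyGetD cs j' []) M < m
      · rw [if_pos hlt] at heq
        simp only [Option.some.injEq, Prod.mk.injEq] at heq
        refine ⟨by omega, by omega, by omega⟩
      · rw [if_neg hlt] at heq
        exact hb' d2 i2 j2 heq

theorem pvLoop_eq (nc : Int) (M : List (List Int)) :
    ∀ (fuel : Nat) (cs D : List (List Int)), pvInv cs D M →
      pvLoopA nc M fuel cs = pvLoopB nc fuel cs D := by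
  intro fuel
  induction fuel with
  | zero => intro cs D _; rfl
  | succ k ih =>
    intro cs D h
    simp only [pvLoopA, pvLoopB]
    by_cases hc : PySem.List.len cs > nc
    · rw [if_pos hc, if_pos hc, pvScan_eq cs D M h]
      cases hs : pvScanB cs D with
      | none => rfl
      | some t =>
        obtain ⟨dd, a, b⟩ := t
        have hb := pvScanA_bounds cs M dd a b (by rw [pvScan_eq cs D M h, hs])
        simp only []
        have hmerge : pvMergeClusters cs a b = (pvMergeB cs D a b).1 := by
          unfold pvMergeClusters pvMergeB
          rw [if_neg (by omega : ¬ a > b)]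
        rw [hmerge]
        exact ih _ _ (pvInv_merge cs D M h a b hb.1 hb.2.1 hb.2.2)
    · rw [if_neg hc, if_neg hc]

theorem pvInv_init (n : Int) (M : List (List Int)) :
    pvInv ((PySem.List.pyRange 0 n 1).map (fun i => [i]))
      ((PySem.List.pyRange 0 n 1).map (fun i =>
        (PySem.List.pyRange 0 n 1).map (fun j =>
          max 0 (PySem.List.pyGetD (PySem.List.pyGetD M i []) j 0)))) M := by
  refine ⟨by simp, by intro r hr; simp only [List.mem_map] at hr; obtain ⟨x, _, hx⟩ := hr; simp [← hx], ?_⟩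
  intro i j hi hj hij
  simp only [List.length_map] at hi hj
  rw [pv_getD_map _ _ i hi [] 0, pv_getD_map _ _ i hi [] 0, pv_getD_map _ _ j hj [] 0,
    pv_getD_map _ _ j hj 0 0]
  rw [List.getD_eq_getElem _ _ hi, List.getD_eq_getElem _ _ hj]
  simp only [PySem.List.getElem_pyRange_one, zero_add]
  unfold pvCalcDist
  simp only [List.foldl_cons, List.foldl_nil]
  omega

theorem pvLoopA_stop (nc : Int) (M : List (List Int)) (fuel : Nat) (cs : List (List Int))
    (h : ¬ PySem.List.len cs > nc) : pvLoopA nc M fuel cs = cs := by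
  cases fuel with
  | zero => rfl
  | succ k => simp only [pvLoopA]; rw [if_neg h]

-- ===== VERDICT (by name: the statement is the Claim_ definition above) =====
theorem agglomerative_clustering_spec : Claim_equal_agglomerative_clustering := by
  intro n nc M _ _
  unfold Spec_agglomerative_clustering agglomerative_clustering agglomerative_clustering_alt
  by_cases hle : PySem.List.len ((PySem.List.pyRange 0 n 1).map (fun i => ([i] : List Int))) ≤ nc
  · simp only [hle, if_pos]
    exact pvLoopA_stop nc M _ _ (by omega)
  · simp only [hle, if_neg, not_false_iff]
    exact pvLoop_eq nc M _ _ _ (pvInv_init n M)
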